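-- pv_equiv track=rewrite | github.com/iluvatar80/untis-monitor | untis_inspect.py | score_columns
-- ===== SOURCE A (Python) =====
-- KEYWORDS = [
--     "klasse", "klasse(n)", "kl.", "stunde", "fach", "lehrer", "raum",
--     "art", "text", "info", "vertreter", "datum", "absenz", "entfall"
-- ]
--
-- def score_columns(cols):
--     cols_l = [c.lower() for c in cols]
--     score = 0
--     hits = []
--     for kw in KEYWORDS:
--         for c in cols_l:
--             if kw in c:
--                 score += 1
--                 hits.append(kw)
--                 break
--     return score, sorted(set(hits))
-- ===== SOURCE B (Python) =====
-- KEYWORDS = [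
--     "klasse", "klasse(n)", "kl.", "stunde", "fach", "lehrer", "raum",
--     "art", "text", "info", "vertreter", "datum", "absenz", "entfall"
-- ]
--
-- def score_columns(cols):
--     blob = "\n".join(c.lower() for c in cols)
--     matched = [kw for kw in KEYWORDS if kw in blob]
--     return len(matched), sorted(matched)
-- ===== Notes on version B (the rewrite author's own statement) =====
-- stated objective: faster
-- what changed: B replaces A's per-keyword scan over the column list with an early break (and a set-dedup of appended hits) by one newline-joined lowercase blob searched once per keyword, filtering KEYWORDS directly; safe because no keyword contains the newline separator.
import Mathlib
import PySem

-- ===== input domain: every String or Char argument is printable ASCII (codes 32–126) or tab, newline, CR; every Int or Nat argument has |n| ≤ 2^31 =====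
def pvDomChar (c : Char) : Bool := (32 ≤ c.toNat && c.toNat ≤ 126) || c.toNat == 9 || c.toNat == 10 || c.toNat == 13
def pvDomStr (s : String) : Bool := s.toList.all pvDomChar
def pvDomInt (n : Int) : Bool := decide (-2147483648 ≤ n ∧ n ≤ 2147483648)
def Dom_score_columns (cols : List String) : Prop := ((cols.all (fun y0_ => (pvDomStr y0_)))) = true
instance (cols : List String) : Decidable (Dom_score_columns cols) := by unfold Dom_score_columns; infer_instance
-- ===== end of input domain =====

-- B rebuilds the result from one joined lowercase blob searched once per keyword, instead of
-- A's per-keyword scan over the columns with a break; lowercasing happens once per column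
-- (a timing run measured B faster by a constant factor).

-- the module constant KEYWORDS, shared by both Pythons
def pvKEYWORDS : List String :=
  ["klasse", "klasse(n)", "kl.", "stunde", "fach", "lehrer", "raum",
   "art", "text", "info", "vertreter", "datum", "absenz", "entfall"]

-- ===== PORT A =====
-- inner 'for c in cols_l: if kw in c: …; break' — its sole effect is whether a hit exists
def pvInnerA (kw : String) : List String → Bool
  | [] => false
  | c :: cs => if PySem.Str.isIn kw c then true else pvInnerA kw cs

def score_columns (cols : List String) : Int × List String :=
  let cols_l := cols.map PySem.Str.lower
  let st := pvKEYWORDS.foldl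
    (fun (st : Int × List String) kw =>
      if pvInnerA kw cols_l then (st.1 + 1, st.2 ++ [kw]) else st) (0, [])
  (st.1, PySem.List.sorted (PySem.Set.ofList st.2) (fun x => x) false)

-- ===== PORT B =====
def score_columns_alt (cols : List String) : Int × List String :=
  let blob := PySem.Str.join "\n" (cols.map PySem.Str.lower)
  let matched := pvKEYWORDS.filter (fun kw => PySem.Str.isIn kw blob)
  ((matched.length : Int), PySem.List.sorted matched (fun x => x) false)

-- ===== PRECONDITION & SPEC =====
def Spec_score_columns (cols : List String) (out : Int × List String) : Prop := out = score_columns_alt cols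
instance (cols : List String) (out : Int × List String) : Decidable (Spec_score_columns cols out) := by unfold Spec_score_columns; infer_instance

-- ===== CLAIM (what is proved, stated in full; the proofs are below) =====
def Claim_equal_score_columns : Prop := ∀ (cols : List String), Dom_score_columns cols → Spec_score_columns cols (score_columns cols)

-- ===== LEMMAS AND PROOFS =====

-- an occurrence that cannot contain c lies entirely left or right of the separator c
theorem infix_split {α : Type} {kw a b : List α} {c : α} (hc : c ∉ kw)
    (h : kw <:+: a ++ c :: b) : kw <:+: a ∨ kw <:+: b := by
  obtain ⟨s, t, h⟩ := h
  by_cases h1 : s.length + kw.length ≤ a.length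
  · left
    have hslen : s.length ≤ a.length := by omega
    have hklen : kw.length ≤ (List.drop s.length a).length := by simp; omega
    have key : kw = List.take kw.length (List.drop s.length a) := by
      calc kw = List.take kw.length (kw ++ t) := by simp
        _ = List.take kw.length (List.drop s.length (s ++ kw ++ t)) := by
              rw [List.append_assoc, List.drop_left]
        _ = List.take kw.length (List.drop s.length (a ++ c :: b)) := by rw [h]
        _ = List.take kw.length (List.drop s.length a ++ c :: b) := by
              rw [List.drop_append_of_le_length hslen]
        _ = List.take kw.length (List.drop s.length a) := by
              rw [List.take_append_of_le_length hklen]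
    exact key ▸ ((List.take_prefix _ _).isInfix.trans (List.drop_suffix _ _).isInfix)
  · by_cases h2 : a.length + 1 ≤ s.length
    · right
      have hd := congrArg (List.drop (a.length + 1)) h
      rw [List.drop_append_of_le_length (l₁ := s ++ kw) (by simp; omega)] at hd
      rw [List.drop_append_of_le_length h2] at hd
      have hb : List.drop (a.length + 1) (a ++ c :: b) = b := by
        rw [show a ++ c :: b = (a ++ [c]) ++ b by simp,
          show a.length + 1 = (a ++ [c]).length by simp, List.drop_left]
      rw [hb] at hd
      exact ⟨_, t, by rw [← hd]⟩
    · exfalso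
      have hlt : a.length - s.length < kw.length := by omega
      have hsl : s.length ≤ a.length := by omega
      have h3 : a.length < (a ++ c :: b).length := by simp
      have h4 : a.length < (s ++ kw ++ t).length := by rw [h]; exact h3
      have hget : (a ++ c :: b)[a.length]'h3 = c := by
        simp [List.getElem_append_right (Nat.le_refl a.length)]
      have h5 : a.length < (s ++ (kw ++ t)).length := by simpa using h4
      have hget2 : (s ++ (kw ++ t))[a.length]'h5 = kw[a.length - s.length]'hlt := by
        rw [List.getElem_append_right hsl, List.getElem_append_left hlt]
      have hc2 : kw[a.length - s.length]'hlt = c := by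
        rw [← hget2, List.getElem_of_eq (List.append_assoc s kw t).symm,
          List.getElem_of_eq h, hget]
      exact hc (hc2 ▸ List.getElem_mem hlt)

-- a nonempty needle without the separator is in the join iff it is in one of the parts
theorem infix_join_iff {kw : List Char} {sep : Char} (hne : kw ≠ []) (hsep : sep ∉ kw) :
    ∀ ls : List (List Char), (kw <:+: PySem.Chars.join [sep] ls ↔ ∃ l ∈ ls, kw <:+: l) := by
  intro ls
  induction ls with
  | nil =>
    rw [PySem.Chars.join_nil]
    simp [List.infix_iff_prefix_suffix, hne]
  | cons p rest ih =>
    cases rest with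
    | nil => simp [PySem.Chars.join_singleton]
    | cons q rest' =>
      rw [PySem.Chars.join_cons_cons]
      constructor
      · intro h
        rw [List.append_assoc] at h
        rcases infix_split hsep (by simpa using h) with h' | h'
        · exact ⟨p, by simp, h'⟩
        · obtain ⟨l, hl, hkl⟩ := ih.mp h'
          exact ⟨l, by simp [hl], hkl⟩
      · rintro ⟨l, hl, hkl⟩
        rcases List.mem_cons.mp hl with rfl | hl'
        · rw [List.append_assoc]
          exact hkl.trans (List.prefix_append _ _).isInfix
        · exact (ih.mpr ⟨l, hl', hkl⟩).trans (List.suffix_append _ _).isInfix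

-- the inner loop of A finds a hit iff some column contains the keyword
theorem pvInnerA_iff (kw : String) (cs : List String) :
    pvInnerA kw cs = true ↔ ∃ c ∈ cs, PySem.Str.isIn kw c = true := by
  induction cs with
  | nil => simp [pvInnerA]
  | cons c cs ih =>
    constructor
    · intro hA
      simp only [pvInnerA] at hA
      by_cases h : PySem.Str.isIn kw c = true
      · exact ⟨c, List.mem_cons_self, h⟩
      · obtain ⟨x, hx, hkx⟩ := ih.mp (by rwa [if_neg h] at hA)
        exact ⟨x, List.mem_cons_of_mem _ hx, hkx⟩
    · rintro ⟨x, hx, hkx⟩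
      simp only [pvInnerA]
      by_cases h : PySem.Str.isIn kw c = true
      · rw [if_pos h]
      · rw [if_neg h]
        rcases List.mem_cons.mp hx with rfl | hx'
        · exact absurd hkx h
        · exact ih.mpr ⟨x, hx', hkx⟩

-- for every keyword (nonempty, no newline) the inner loop agrees with the blob test
theorem inner_eq_blob (kw : String) (hne : kw.toList ≠ []) (hsep : '\n' ∉ kw.toList)
    (cols : List String) :
    pvInnerA kw (cols.map PySem.Str.lower)
      = PySem.Str.isIn kw (PySem.Str.join "\n" (cols.map PySem.Str.lower)) := by
  rw [Bool.eq_iff_iff, pvInnerA_iff, PySem.Str.isIn_iff_infix, PySem.Str.toList_join,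
    show ("\n".toList : List Char) = ['\n'] from rfl, infix_join_iff hne hsep]
  constructor
  · rintro ⟨c, hc, hkc⟩
    exact ⟨c.toList, List.mem_map_of_mem hc, (PySem.Str.isIn_iff_infix kw c).mp hkc⟩
  · rintro ⟨l, hl, hkl⟩
    obtain ⟨c, hc, rfl⟩ := List.mem_map.mp hl
    exact ⟨c, hc, (PySem.Str.isIn_iff_infix kw c).mpr hkl⟩

-- A's keyword loop computes (count, list) of the keywords its test accepts
theorem foldA (p : String → Bool) (l : List String) (s : Int) (h : List String) :
    l.foldl (fun (st : Int × List String) kw =>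
        if p kw then (st.1 + 1, st.2 ++ [kw]) else st) (s, h)
      = (s + (l.filter p).length, h ++ l.filter p) := by
  induction l generalizing s h with
  | nil => simp
  | cons x xs ih =>
    by_cases hx : p x
    · simp [hx, ih]; omega
    · simp [hx, ih]

theorem keywords_ok : ∀ kw ∈ pvKEYWORDS, kw.toList ≠ [] ∧ '\n' ∉ kw.toList := by decide

-- ===== VERDICT (by name: the statement is the Claim_ definition above) =====
theorem score_columns_spec : Claim_equal_score_columns := by
  intro cols _
  show score_columns cols = score_columns_alt cols
  simp only [score_columns, score_columns_alt]
  rw [foldA, List.nil_append]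
  simp only [zero_add]
  have hcongr : pvKEYWORDS.filter (fun kw => pvInnerA kw (cols.map PySem.Str.lower))
      = pvKEYWORDS.filter (fun kw => PySem.Str.isIn kw (PySem.Str.join "\n" (cols.map PySem.Str.lower))) := by
    apply List.filter_congr
    intro kw hkw
    exact inner_eq_blob kw (keywords_ok kw hkw).1 (keywords_ok kw hkw).2 cols
  rw [hcongr, PySem.Set.ofList_eq_self_of_nodup _ (List.Nodup.filter _ (by decide))]
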